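-- pv_equiv track=rewrite | github.com/CarlosrmTO/Discover-Monitor | discover_monitor/check_sitemaps.py | find_sitemap_in_robots
-- ===== SOURCE A (Python) =====
-- def find_sitemap_in_robots(robots_content):
--     """Busca la ruta del sitemap en el contenido de robots.txt"""
--     if not robots_content:
--         return None
--
--     for line in robots_content.split('\n'):
--         line = line.strip()
--         if line.lower().startswith('sitemap:'):
--             parts = line.split(':', 1)
--             if len(parts) > 1:
--                 return parts[1].strip()
--     return None
-- ===== SOURCE B (Python) =====
-- import re
--
-- _SITEMAP_RE = re.compile(r'(?im)^[ \t\r]*sitemap:(.*)$')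
--
-- def find_sitemap_in_robots(robots_content):
--     """Busca la ruta del sitemap en el contenido de robots.txt"""
--     if not robots_content:
--         return None
--     m = _SITEMAP_RE.search(robots_content)
--     if m:
--         return m.group(1).strip()
--     return None
-- ===== Notes on version B (the rewrite author's own statement) =====
-- stated objective: idiomatic
-- what changed: Replaces A's per-line strip/lower/startswith/split loop by a single precompiled multiline case-insensitive regex search (re.search(r'(?im)^[ \t\r]*sitemap:(.*)$')) that finds the first sitemap line and strips its captured value.
import Mathlib
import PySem

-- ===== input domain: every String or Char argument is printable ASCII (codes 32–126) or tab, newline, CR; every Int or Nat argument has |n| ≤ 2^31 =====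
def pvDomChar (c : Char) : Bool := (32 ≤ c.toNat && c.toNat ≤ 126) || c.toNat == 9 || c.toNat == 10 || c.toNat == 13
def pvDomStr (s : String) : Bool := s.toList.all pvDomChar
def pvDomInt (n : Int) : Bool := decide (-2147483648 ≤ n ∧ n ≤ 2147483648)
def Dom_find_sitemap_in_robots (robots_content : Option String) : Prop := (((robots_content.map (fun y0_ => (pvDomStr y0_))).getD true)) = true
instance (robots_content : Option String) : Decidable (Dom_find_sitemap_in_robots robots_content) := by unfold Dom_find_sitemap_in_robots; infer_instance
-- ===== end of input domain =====

-- B replaces A's strip/lower/split line loop by one anchored regex search; equivalence is proved on the ASCII domain.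

-- ===== PORT A =====
-- the 'for line in robots_content.split('\n')' loop
def pvLoopA : List (List Char) → Option (List Char)
  | [] => none
  | l :: rest =>
    let line := PySem.Chars.strip l
    if PySem.Chars.startswith (PySem.Chars.lower line) "sitemap:".toList then
      match PySem.Chars.splitOnMax line [':'] 1 with
      | _ :: p1 :: _ => some (PySem.Chars.strip p1)   -- len(parts) > 1: return parts[1].strip()
      | _ => pvLoopA rest
    else pvLoopA rest

def find_sitemap_in_robots (robots_content : Option String) : Option String :=
  match robots_content with
  | none => none
  | some s =>
    if s.toList = [] then none   -- 'if not robots_content'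
    else (pvLoopA (PySem.Chars.splitOn s.toList ['\n'])).map (fun cs => String.ofList cs)

-- ===== PORT B =====
-- Hand port of re.search(r'(?im)^[ \t\r]*sitemap:(.*)$', s), exact on the ASCII domain:
-- the pattern is anchored by '^', so the engine attempts a match at each line start in order;
-- IGNORECASE on ASCII is comparison after lowercasing; '(.*)$' captures up to the next '\n'.
-- one anchored match attempt: [ \t\r]* sitemap: (.*)   then Python-level .strip() of group 1
def pvTryB (cs : List Char) : Option (List Char) :=
  let t := cs.dropWhile (fun c => c == ' ' || c == '\t' || c == '\r')
  if PySem.Chars.startswith (PySem.Chars.lower t) "sitemap:".toList then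
    some (PySem.Chars.strip (List.takeWhile (fun c => !(c == '\n')) (t.drop 8)))
  else none

-- the search: try at the current line start, else advance past the next '\n'
def pvSearchB (cs : List Char) : Option (List Char) :=
  match pvTryB cs with
  | some g => some g
  | none =>
    let t := cs.dropWhile (fun c => !(c == '\n'))
    if _ht : t = [] then none else pvSearchB t.tail
termination_by cs.length
decreasing_by
  have hs := (List.dropWhile_suffix (l := cs) (fun c => !(c == '\n'))).length_le
  rcases h : cs.dropWhile (fun c => !(c == '\n')) with _ | ⟨c, rest⟩
  · exact absurd h _ht
  · rw [h] at hs; simp at hs ⊢; omega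

def find_sitemap_in_robots_alt (robots_content : Option String) : Option String :=
  match robots_content with
  | none => none
  | some s =>
    if s.toList = [] then none
    else (pvSearchB s.toList).map (fun cs => String.ofList cs)

-- ===== PRECONDITION & SPEC =====
def Spec_find_sitemap_in_robots (robots_content : Option String) (out : Option String) : Prop := out = find_sitemap_in_robots_alt robots_content
instance (robots_content : Option String) (out : Option String) : Decidable (Spec_find_sitemap_in_robots robots_content out) := by unfold Spec_find_sitemap_in_robots; infer_instance

-- ===== CLAIM =====
def Claim_equal_find_sitemap_in_robots : Prop := ∀ (robots_content : Option String), Dom_find_sitemap_in_robots robots_content → Spec_find_sitemap_in_robots robots_content (find_sitemap_in_robots robots_content)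

-- ===== LEMMAS AND PROOFS =====

-- structural model of s.split('\n') used only in the proofs
def pvLines : List Char → List Char → List (List Char)
  | cur, [] => [cur]
  | cur, c :: r => if c = '\n' then cur :: pvLines [] r else pvLines (cur ++ [c]) r

theorem pvDropWhile_congr {α : Type} (p q : α → Bool) : ∀ (l : List α), (∀ c ∈ l, p c = q c) → l.dropWhile p = l.dropWhile q := by
  intro l h
  induction l with
  | nil => rfl
  | cons c t ih =>
    have hc := h c (by simp)
    simp only [List.dropWhile_cons, hc]
    split
    · exact ih (fun x hx => h x (by simp [hx]))
    · rfl

-- char-level facts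
theorem pvToNatInj {c d : Char} (h : c.toNat = d.toNat) : c = d := by
  rw [← Char.ofNat_toNat c, ← Char.ofNat_toNat d, h]

theorem pvBeqNat (c d : Char) : (c == d) = decide (c.toNat = d.toNat) := by
  by_cases h : c = d
  · subst h; simp
  · have h2 : c.toNat ≠ d.toNat := fun e => h (pvToNatInj e)
    simp [h, h2]

theorem pvCharWs (c : Char) (hd : pvDomChar c = true) (hn : c ≠ '\n') :
    (c == ' ' || c == '\t' || c == '\r') = PySem.Chars.isspace c := by
  have hn' : c.toNat ≠ 10 := fun e => hn (pvToNatInj e)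
  simp only [pvDomChar, Bool.or_eq_true, Bool.and_eq_true, decide_eq_true_eq, beq_iff_eq] at hd
  simp only [pvBeqNat, PySem.Chars.isspace]
  rw [Bool.eq_iff_iff]
  simp only [Bool.or_eq_true, Bool.and_eq_true, decide_eq_true_eq,
    show (' ' : Char).toNat = 32 from rfl, show ('\t' : Char).toNat = 9 from rfl,
    show ('\r' : Char).toNat = 13 from rfl]
  omega

theorem pvLeToNat {c d : Char} : (c ≤ d) ↔ c.toNat ≤ d.toNat := by
  rw [Char.le_def, UInt32.le_iff_toNat_le]
  exact Iff.rfl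

theorem pvLowerColon (c : Char) (h : PySem.Chars.lowerChar c = ':') : c = ':' := by
  unfold PySem.Chars.lowerChar at h
  split at h
  · exfalso
    rename_i hu
    simp only [PySem.Chars.isupper, Bool.and_eq_true, decide_eq_true_eq, pvLeToNat,
      show ('A' : Char).toNat = 65 from rfl, show ('Z' : Char).toNat = 90 from rfl] at hu
    have h58 : (Char.ofNat (c.toNat + 32)).toNat = (':' : Char).toNat := by rw [h]
    rw [Char.toNat_ofNat, if_pos (Or.inl (by omega))] at h58
    have h58' : (':' : Char).toNat = 58 := rfl
    omega
  · exact h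

theorem pvLowerSplit : ∀ (m u t : List Char), List.map PySem.Chars.lowerChar m = u ++ ':' :: t → ':' ∉ u →
    ∃ a b, m = a ++ ':' :: b ∧ List.map PySem.Chars.lowerChar a = u ∧ ':' ∉ a ∧ List.map PySem.Chars.lowerChar b = t := by
  intro m
  induction m with
  | nil => intro u t h _; exact absurd h (by simp)
  | cons c ms ih =>
    intro u t h hu
    cases u with
    | nil =>
      simp only [List.map_cons, List.nil_append] at h
      obtain ⟨h1, h2⟩ := List.cons.injEq .. ▸ h
      exact ⟨[], ms, by simp [pvLowerColon c h1], rfl, by simp, h2⟩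
    | cons x us =>
      simp only [List.map_cons, List.cons_append, List.cons.injEq] at h
      obtain ⟨h1, h2⟩ := h
      obtain ⟨a, b, hm, ha, hca, hb⟩ := ih us t h2 (fun e => hu (by simp [e]))
      refine ⟨c :: a, b, by simp [hm], by simp [ha, h1], ?_, hb⟩
      intro hc
      rcases List.mem_cons.mp hc with e | e
      · subst e
        have : PySem.Chars.lowerChar ':' = ':' := by decide
        rw [this] at h1
        exact hu (by simp [← h1])
      · exact hca e

theorem pvRstripAppend (y b : List Char) (x : Char) (hx : PySem.Chars.isspace x = false) :
    PySem.Chars.rstrip (y ++ x :: b) = y ++ x :: PySem.Chars.rstrip b := by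
  unfold PySem.Chars.rstrip
  rw [List.reverse_append, List.reverse_cons, List.append_assoc, List.dropWhile_append]
  split
  · rename_i he
    rw [List.isEmpty_iff] at he
    simp only [List.singleton_append, List.dropWhile_cons, hx]
    simp [he]
  · simp

theorem pvRstripSpaceAppend (z s : List Char) (hs : ∀ c ∈ s, PySem.Chars.isspace c = true) :
    PySem.Chars.rstrip (z ++ s) = PySem.Chars.rstrip z := by
  unfold PySem.Chars.rstrip
  rw [List.reverse_append, List.dropWhile_append]
  have : List.dropWhile PySem.Chars.isspace s.reverse = [] :=
    List.dropWhile_eq_nil_iff.mpr (fun c hc => hs c (List.mem_reverse.mp hc))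
  simp [this]

theorem pvStripSpaceAppend (y s : List Char) (hs : ∀ c ∈ s, PySem.Chars.isspace c = true) :
    PySem.Chars.strip (y ++ s) = PySem.Chars.strip y := by
  unfold PySem.Chars.strip PySem.Chars.lstrip
  rw [List.dropWhile_append]
  split
  · rename_i he
    rw [List.isEmpty_iff] at he
    rw [List.dropWhile_eq_nil_iff.mpr hs, he]
  · exact pvRstripSpaceAppend _ _ hs

theorem pvStripRstrip (b : List Char) : PySem.Chars.strip (PySem.Chars.rstrip b) = PySem.Chars.strip b := by
  have hdecomp : b = PySem.Chars.rstrip b ++ (List.takeWhile PySem.Chars.isspace b.reverse).reverse := by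
    unfold PySem.Chars.rstrip
    conv_lhs => rw [← List.reverse_reverse b,
      ← List.takeWhile_append_dropWhile (p := PySem.Chars.isspace) (l := b.reverse)]
    rw [List.reverse_append]
  conv_rhs => rw [hdecomp]
  rw [pvStripSpaceAppend]
  intro c hc
  exact List.mem_takeWhile_imp (List.mem_reverse.mp hc)

theorem pvPrefixStop : ∀ (pat m r : List Char), '\n' ∉ pat →
    pat.isPrefixOf (List.map PySem.Chars.lowerChar (m ++ '\n' :: r)) = pat.isPrefixOf (List.map PySem.Chars.lowerChar m) := by
  intro pat
  induction pat with
  | nil => intro m r _; rfl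
  | cons x ps ih =>
    intro m r h
    cases m with
    | nil =>
      have hx : x ≠ '\n' := fun e => h (by simp [e])
      have hl : PySem.Chars.lowerChar '\n' = '\n' := by decide
      simp [List.isPrefixOf, hl, hx]
    | cons c ms =>
      simp only [List.cons_append, List.map_cons, List.isPrefixOf]
      rw [ih ms r (fun e => h (by simp [e]))]

theorem pvGoMaxZero : ∀ (f : Nat) (l cur : List Char) (accs : List (List Char)),
    PySem.Chars.splitOnMax.go [':'] f 0 l cur accs = ((cur.reverse ++ l) :: accs).reverse := by
  intro f l cur accs
  cases f with
  | zero => rfl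
  | succ f => cases l with
    | nil => simp [PySem.Chars.splitOnMax.go]
    | cons c rest => simp [PySem.Chars.splitOnMax.go]

theorem pvGoMaxOne (r : List Char) : ∀ (a : List Char) (f : Nat) (cur : List Char) (accs : List (List Char)),
    ':' ∉ a → a.length + r.length + 1 ≤ f →
    PySem.Chars.splitOnMax.go [':'] f 1 (a ++ ':' :: r) cur accs = accs.reverse ++ [cur.reverse ++ a, r] := by
  intro a
  induction a with
  | nil =>
    intro f cur accs _ hf
    cases f with
    | zero => omega
    | succ f =>
      simp only [List.nil_append]
      rw [PySem.Chars.splitOnMax.go]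
      simp only [List.isPrefixOf, beq_self_eq_true, Bool.true_and]
      norm_num
      rw [pvGoMaxZero]
      simp
  | cons x as ih =>
    intro f cur accs hx hf
    have hxc : ¬((':' : Char) == x) = true := by
      simp only [beq_iff_eq]
      intro e; exact hx (by simp [← e])
    cases f with
    | zero => simp at hf
    | succ f =>
      simp only [List.cons_append]
      rw [PySem.Chars.splitOnMax.go]
      simp only [List.isPrefixOf, Bool.and_eq_true] at *
      rw [if_neg (by omega), if_neg (by simp [hxc])]
      rw [ih f (x :: cur) accs (fun e => hx (by simp [e])) (by simp at hf ⊢; omega)]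
      simp

theorem pvSplitOnMaxColon (r : List Char) : ∀ (a : List Char), ':' ∉ a →
    PySem.Chars.splitOnMax (a ++ ':' :: r) [':'] 1 = [a, r] := by
  intro a ha
  unfold PySem.Chars.splitOnMax
  rw [if_neg (by norm_num), show Int.toNat 1 = 1 from rfl]
  rw [pvGoMaxOne r a _ [] [] ha (by simp)]
  simp

theorem pvGoSplit : ∀ (l : List Char) (f : Nat) (cur : List Char) (accs : List (List Char)),
    l.length ≤ f →
    PySem.Chars.splitOn.go ['\n'] f l cur accs = accs.reverse ++ pvLines cur.reverse l := by
  intro l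
  induction l with
  | nil =>
    intro f cur accs _
    cases f with
    | zero => simp [PySem.Chars.splitOn.go, pvLines]
    | succ f => simp [PySem.Chars.splitOn.go, pvLines]
  | cons c rest ih =>
    intro f cur accs hf
    cases f with
    | zero => simp at hf
    | succ f =>
      rw [PySem.Chars.splitOn.go]
      by_cases hc : c = '\n'
      · subst hc
        rw [if_pos (by simp [List.isPrefixOf])]
        rw [show List.drop ['\n'].length ('\n' :: rest) = rest from rfl]
        rw [ih f [] (cur.reverse :: accs) (by simpa using hf)]
        simp [pvLines]
      · rw [if_neg (by simp [List.isPrefixOf, Ne.symm hc])]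
        rw [ih f (c :: cur) accs (by simpa using hf)]
        simp [pvLines, hc]

theorem pvSplitOn_eq_pvLines (cs : List Char) : PySem.Chars.splitOn cs ['\n'] = pvLines [] cs := by
  unfold PySem.Chars.splitOn
  rw [pvGoSplit cs (cs.length + 1) [] [] (by omega)]
  simp

-- decompose a list whose lowering is u ++ ':' :: t, with ':' ∉ u
theorem pvLines_append (r : List Char) : ∀ (l cur : List Char), '\n' ∉ l →
    pvLines cur (l ++ '\n' :: r) = (cur ++ l) :: pvLines [] r := by
  intro l
  induction l with
  | nil => intro cur _; simp [pvLines]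
  | cons c t ih =>
    intro cur h
    have hc : c ≠ '\n' := by intro e; exact h (by simp [e])
    simp only [List.cons_append, pvLines, if_neg hc]
    rw [ih (cur ++ [c]) (fun e => h (by simp [e]))]
    simp

theorem pvLines_no_nl : ∀ (l cur : List Char), '\n' ∉ l → pvLines cur l = [cur ++ l] := by
  intro l
  induction l with
  | nil => intro cur _; simp [pvLines]
  | cons c t ih =>
    intro cur h
    have hc : c ≠ '\n' := by intro e; exact h (by simp [e])
    simp only [pvLines, if_neg hc]
    rw [ih (cur ++ [c]) (fun e => h (by simp [e]))]
    simp

-- a '\n'-free pattern matches the lowered extension iff it matches the lowered line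
theorem pvDropWhileWs_append (l r : List Char) :
    List.dropWhile (fun c => c == ' ' || c == '\t' || c == '\r') (l ++ '\n' :: r) =
      List.dropWhile (fun c => c == ' ' || c == '\t' || c == '\r') l ++ '\n' :: r := by
  rw [List.dropWhile_append]
  split
  · rename_i he
    rw [List.isEmpty_iff] at he
    rw [he, List.nil_append, List.dropWhile_cons, if_neg (by decide)]
  · rfl

theorem pvTryB_append (l r : List Char) (h : '\n' ∉ l) : pvTryB (l ++ '\n' :: r) = pvTryB l := by
  unfold pvTryB
  rw [pvDropWhileWs_append]
  have hm_nl : '\n' ∉ List.dropWhile (fun c => c == ' ' || c == '\t' || c == '\r') l :=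
    fun hc => h ((List.dropWhile_sublist _).subset hc)
  set m := List.dropWhile (fun c => c == ' ' || c == '\t' || c == '\r') l with hm
  have hpat : ("sitemap:".toList).isPrefixOf (PySem.Chars.lower (m ++ '\n' :: r)) =
      ("sitemap:".toList).isPrefixOf (PySem.Chars.lower m) := by
    simp only [PySem.Chars.lower]
    exact pvPrefixStop _ m r (by decide)
  simp only [PySem.Chars.startswith, hpat]
  by_cases hB : ("sitemap:".toList).isPrefixOf (PySem.Chars.lower m) = true
  · rw [if_pos hB, if_pos hB]
    have hlen : 8 ≤ m.length := by
      have := (List.isPrefixOf_iff_prefix.mp hB).length_le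
      simpa [PySem.Chars.lower] using this
    have hdrop : List.drop 8 (m ++ '\n' :: r) = List.drop 8 m ++ '\n' :: r :=
      List.drop_append_of_le_length hlen
    have hsub : ∀ c ∈ List.drop 8 m, (!(c == '\n')) = true := by
      intro c hc
      have : c ≠ '\n' := fun e => hm_nl (e ▸ (List.drop_sublist 8 m).subset hc)
      simp [this]
    rw [hdrop, List.takeWhile_append]
    rw [List.takeWhile_eq_self_iff.mpr hsub]
    rw [if_pos rfl, List.takeWhile_cons, if_neg (by decide), List.append_nil]
  · rw [if_neg hB, if_neg hB]

theorem pvRstripPrefix (m : List Char) : PySem.Chars.rstrip m <+: m := by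
  unfold PySem.Chars.rstrip
  have := List.reverse_prefix.mpr (List.dropWhile_suffix (l := m.reverse) PySem.Chars.isspace)
  rwa [List.reverse_reverse] at this

theorem pvPerLine (l : List Char) (ls : List (List Char)) (hnl : '\n' ∉ l) (hd : ∀ c ∈ l, pvDomChar c = true) :
    pvLoopA (l :: ls) = (match pvTryB l with | some g => some g | none => pvLoopA ls) := by
  have hcong : List.dropWhile (fun c => c == ' ' || c == '\t' || c == '\r') l =
      List.dropWhile PySem.Chars.isspace l :=
    pvDropWhile_congr _ _ l (fun c hc => pvCharWs c (hd c hc) (fun e => hnl (e ▸ hc)))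
  have hm_nl : '\n' ∉ List.dropWhile PySem.Chars.isspace l :=
    fun hc => hnl ((List.dropWhile_sublist _).subset hc)
  set m := List.dropWhile PySem.Chars.isspace l with hm
  have hstrip : PySem.Chars.strip l = PySem.Chars.rstrip m := rfl
  simp only [pvLoopA, pvTryB, hcong, PySem.Chars.startswith, hstrip]
  by_cases hB : ("sitemap:".toList).isPrefixOf (PySem.Chars.lower m) = true
  · obtain ⟨t, ht⟩ := List.isPrefixOf_iff_prefix.mp hB
    have ht' : List.map PySem.Chars.lowerChar m = ['s','i','t','e','m','a','p'] ++ ':' :: t := by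
      simpa [PySem.Chars.lower] using ht.symm
    obtain ⟨a, b, hm_eq, ha, hca, hb⟩ := pvLowerSplit m _ t ht' (by decide)
    have halen : a.length = 7 := by
      have := congrArg List.length ha; simpa using this
    have hrs : PySem.Chars.rstrip m = a ++ ':' :: PySem.Chars.rstrip b := by
      rw [hm_eq]; exact pvRstripAppend a b ':' (by decide)
    have hAtest : ("sitemap:".toList).isPrefixOf (PySem.Chars.lower (PySem.Chars.rstrip m)) = true := by
      rw [hrs]
      apply List.isPrefixOf_iff_prefix.mpr
      refine ⟨List.map PySem.Chars.lowerChar (PySem.Chars.rstrip b), ?_⟩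
      simp [PySem.Chars.lower, ha, show PySem.Chars.lowerChar ':' = ':' from by decide]
    rw [if_pos hAtest, if_pos hB]
    rw [hrs, pvSplitOnMaxColon (PySem.Chars.rstrip b) a hca]
    have hdrop : List.drop 8 m = b := by
      rw [hm_eq, show a ++ ':' :: b = (a ++ [':']) ++ b from by simp,
        show (8 : Nat) = (a ++ [':']).length from by simp [halen]]
      exact List.drop_left
    have hb_nl : ∀ c ∈ b, (!(c == '\n')) = true := by
      intro c hc
      have : c ≠ '\n' := fun e => hm_nl (by rw [hm_eq]; subst e; simp [hc])
      simp [this]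
    rw [hdrop, List.takeWhile_eq_self_iff.mpr hb_nl]
    simp [pvStripRstrip]
  · have hAtest : ¬ ("sitemap:".toList).isPrefixOf (PySem.Chars.lower (PySem.Chars.rstrip m)) = true := by
      intro hA
      apply hB
      have h1 : "sitemap:".toList <+: List.map PySem.Chars.lowerChar (PySem.Chars.rstrip m) := by
        simpa [PySem.Chars.lower] using List.isPrefixOf_iff_prefix.mp hA
      apply List.isPrefixOf_iff_prefix.mpr
      simpa [PySem.Chars.lower] using h1.trans ((pvRstripPrefix m).map PySem.Chars.lowerChar)
    rw [if_neg hAtest, if_neg hB]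

theorem pvDropWhileHeadFalse {α : Type} (p : α → Bool) : ∀ (l : List α) (c : α) (rest : List α),
    l.dropWhile p = c :: rest → p c = false := by
  intro l
  induction l with
  | nil => intro c rest h; exact absurd h (by simp)
  | cons x t ih =>
    intro c rest h
    rw [List.dropWhile_cons] at h
    split at h
    · exact ih c rest h
    · rename_i hx
      obtain ⟨h1, _⟩ := List.cons.injEq .. ▸ h
      rw [← h1]
      exact Bool.eq_false_iff.mpr hx

theorem pvMainAux : ∀ (n : Nat) (cs : List Char), cs.length ≤ n → (∀ c ∈ cs, pvDomChar c = true) →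
    pvSearchB cs = pvLoopA (pvLines [] cs) := by
  intro n
  induction n with
  | zero =>
    intro cs hlen _
    have : cs = [] := List.length_eq_zero_iff.mp (by omega)
    subst this
    rw [pvSearchB]
    rfl
  | succ n ih =>
    intro cs hlen hd
    by_cases hmem : '\n' ∈ cs
    · have hne : cs.dropWhile (fun c => !(c == '\n')) ≠ [] := by
        rw [Ne, List.dropWhile_eq_nil_iff]
        push Not
        exact ⟨'\n', hmem, by simp⟩
      obtain ⟨c0, rest, hdw⟩ : ∃ c0 rest, cs.dropWhile (fun c => !(c == '\n')) = c0 :: rest := by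
        cases h : cs.dropWhile (fun c => !(c == '\n')) with
        | nil => exact absurd h hne
        | cons a b => exact ⟨a, b, rfl⟩
      have hc0 : c0 = '\n' := by
        have := pvDropWhileHeadFalse _ cs c0 rest hdw
        simpa using this
      subst hc0
      have hcs : cs = cs.takeWhile (fun c => !(c == '\n')) ++ '\n' :: rest := by
        conv_lhs => rw [← List.takeWhile_append_dropWhile (p := fun c => !(c == '\n')) (l := cs)]
        rw [hdw]
      set l := cs.takeWhile (fun c => !(c == '\n')) with hldef
      have hl_nl : '\n' ∉ l := by
        intro hc
        have := List.mem_takeWhile_imp hc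
        simp at this
      have hlen2 : rest.length ≤ n := by
        have := congrArg List.length hcs
        simp at this
        omega
      have hd_l : ∀ c ∈ l, pvDomChar c = true :=
        fun c hc => hd c (by rw [hcs]; exact List.mem_append_left _ hc)
      have hd_r : ∀ c ∈ rest, pvDomChar c = true :=
        fun c hc => hd c (by rw [hcs]; simp [hc])
      rw [hcs, pvLines_append rest l [] hl_nl, List.nil_append]
      rw [pvPerLine l _ hl_nl hd_l]
      rw [pvSearchB, pvTryB_append l rest hl_nl]
      cases hT : pvTryB l with
      | some g => rfl
      | none =>
        have hdwl : List.dropWhile (fun c => !(c == '\n')) l = [] :=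
          List.dropWhile_eq_nil_iff.mpr (fun x hx => List.mem_takeWhile_imp (p := fun c => !(c == '\n')) (hldef ▸ hx))
        have hdrop2 : List.dropWhile (fun c => !(c == '\n')) (l ++ '\n' :: rest) = '\n' :: rest := by
          rw [List.dropWhile_append, hdwl]
          simp
        simp only [hdrop2]
        rw [dif_neg (by simp)]
        exact ih rest hlen2 hd_r
    · rw [pvLines_no_nl cs [] hmem, List.nil_append]
      rw [pvPerLine cs [] hmem hd]
      rw [pvSearchB]
      cases hT : pvTryB cs with
      | some g => rfl
      | none =>
        have hdwl : List.dropWhile (fun c => !(c == '\n')) cs = [] := by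
          apply List.dropWhile_eq_nil_iff.mpr
          intro x hx
          have : x ≠ '\n' := fun e => hmem (e ▸ hx)
          simp [this]
        simp [hdwl, pvLoopA]

theorem pvMain : ∀ (cs : List Char), (∀ c ∈ cs, pvDomChar c = true) → pvSearchB cs = pvLoopA (pvLines [] cs) :=
  fun cs hd => pvMainAux cs.length cs le_rfl hd

-- ===== VERDICT =====
theorem find_sitemap_in_robots_spec : Claim_equal_find_sitemap_in_robots := by
  intro rc hdom
  unfold Spec_find_sitemap_in_robots
  match rc with
  | none => rfl
  | some s =>
    simp only [find_sitemap_in_robots, find_sitemap_in_robots_alt]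
    split
    · rfl
    · have hd : ∀ c ∈ s.toList, pvDomChar c = true := by
        have : pvDomStr s = true := by
          simpa [Dom_find_sitemap_in_robots] using hdom
        simpa [pvDomStr, List.all_eq_true] using this
      rw [pvSplitOn_eq_pvLines, ← pvMain s.toList hd]
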